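-- pv_equiv track=rewrite | github.com/Evozone/cse-experiments | ai-expts/EightQueens.py | is_goal_state
-- ===== SOURCE A (Python) =====
-- def is_goal_state(state):
--     """Return True if state is a goal state, False otherwise"""
--     # Check if all queens are in different rows
--     if len(set(state)) != len(state):
--         return False
--
--     # Check if all queens are in different diagonals
--     for i in range(len(state)):
--         for j in range(i + 1, len(state)):
--             if abs(state[i] - state[j]) == j - i:
--                 return False
--
--     return True
-- ===== SOURCE B (Python) =====
-- def is_goal_state(state):
--     """Return True if state is a goal state, False otherwise"""
--     n = len(state)
--     # all queens in different rows
--     if len(set(state)) != n: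
--         return False
--     # all queens on different main diagonals (value - index unique)
--     if len(set(state[i] - i for i in range(n))) != n:
--         return False
--     # all queens on different anti-diagonals (value + index unique)
--     return len(set(state[i] + i for i in range(n))) == n
-- ===== Notes on version B (the rewrite author's own statement) =====
-- stated objective: idiomatic
-- what changed: Replaced the nested pairwise diagonal scan by three flat uniqueness checks on the sets of rows, state[i]-i (main diagonals) and state[i]+i (anti-diagonals).
import Mathlib
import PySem

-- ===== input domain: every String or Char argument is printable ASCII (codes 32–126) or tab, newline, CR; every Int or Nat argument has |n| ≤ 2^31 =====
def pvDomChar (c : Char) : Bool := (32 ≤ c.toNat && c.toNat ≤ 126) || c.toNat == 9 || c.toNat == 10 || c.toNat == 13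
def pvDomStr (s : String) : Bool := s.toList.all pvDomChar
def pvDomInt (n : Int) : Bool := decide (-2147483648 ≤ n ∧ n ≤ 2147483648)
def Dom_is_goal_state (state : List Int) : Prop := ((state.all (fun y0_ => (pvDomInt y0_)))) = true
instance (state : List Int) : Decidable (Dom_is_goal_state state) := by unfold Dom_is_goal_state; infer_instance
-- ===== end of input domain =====

-- B replaces A's nested pairwise diagonal scan by three flat uniqueness checks (rows, state[i]-i, state[i]+i).

-- ===== PORT A =====
-- indices i, j always lie in range, so pyGetD (exact there) ports state[i] / state[j];
-- the early 'return False' inside the nested loops is the standard 'any' transliteration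
def is_goal_state (state : List Int) : Bool :=
  if (PySem.Set.ofList state).length ≠ state.length then false
  else if (PySem.List.pyRange 0 (state.length : Int) 1).any (fun i =>
      (PySem.List.pyRange (i + 1) (state.length : Int) 1).any (fun j =>
        |PySem.List.pyGetD state i 0 - PySem.List.pyGetD state j 0| = j - i)) then false
  else true

-- ===== PORT B =====
def is_goal_state_alt (state : List Int) : Bool :=
  let n : Int := state.length
  if (PySem.Set.ofList state).length ≠ state.length then false
  else if (PySem.Set.ofList ((PySem.List.pyRange 0 n 1).map
      (fun i => PySem.List.pyGetD state i 0 - i))).length ≠ state.length then false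
  else (PySem.Set.ofList ((PySem.List.pyRange 0 n 1).map
      (fun i => PySem.List.pyGetD state i 0 + i))).length == state.length

-- ===== PRECONDITION & SPEC =====
def Spec_is_goal_state (state : List Int) (out : Bool) : Prop := out = is_goal_state_alt state
instance (state : List Int) (out : Bool) : Decidable (Spec_is_goal_state state out) := by unfold Spec_is_goal_state; infer_instance

-- ===== CLAIM (what is proved, stated in full; the proofs are below) =====
def Claim_equal_is_goal_state : Prop := ∀ (state : List Int), Dom_is_goal_state state → Spec_is_goal_state state (is_goal_state state)

-- ===== LEMMAS AND PROOFS =====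

-- len(set(xs)) == len(xs)  iff  xs has no duplicates
theorem pv_len_ofList_eq_iff (xs : List Int) :
    (PySem.Set.ofList xs).length = xs.length ↔ xs.Nodup := by
  have hperm : (PySem.Set.ofList xs).Perm xs.dedup := by
    refine (List.perm_ext_iff_of_nodup (PySem.Set.nodup_ofList xs) xs.nodup_dedup).mpr ?_
    intro x; simp [PySem.Set.mem_ofList, List.mem_dedup]
  rw [hperm.length_eq]
  constructor
  · intro h
    have he : xs.dedup = xs := (xs.dedup_sublist).eq_of_length h
    exact he ▸ xs.nodup_dedup
  · intro h; rw [List.dedup_eq_self.mpr h]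

-- Nodup of the comprehension [f(i) for i in range(n)] as a pairwise statement on Nat indices
theorem pv_nodup_map_pyRange (n : Nat) (f : Int → Int) :
    ((PySem.List.pyRange 0 (n : Int) 1).map f).Nodup ↔
      ∀ k l : Nat, k < l → l < n → f k ≠ f l := by
  rw [List.Nodup, List.pairwise_map, List.pairwise_iff_getElem]
  simp only [PySem.List.length_pyRange_one, PySem.List.getElem_pyRange_one]
  constructor
  · intro h k l hkl hl
    have hk' : k < (((n : Int)) - 0).toNat := by omega
    have hl' : l < (((n : Int)) - 0).toNat := by omega
    have := h k l hk' hl' hkl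
    simpa using this
  · intro h k l hk hl hkl
    have hl' : l < n := by omega
    simpa using h k l hkl hl'

-- the pairwise diagonal conflict, characterised
theorem pv_any_pair_iff (state : List Int) :
    ((PySem.List.pyRange 0 (state.length : Int) 1).any (fun i =>
      (PySem.List.pyRange (i + 1) (state.length : Int) 1).any (fun j =>
        |PySem.List.pyGetD state i 0 - PySem.List.pyGetD state j 0| = j - i))) = true ↔
    ∃ k l : Nat, k < l ∧ l < state.length ∧
      (state.getD k 0 - state.getD l 0 = (l : Int) - k ∨
       state.getD k 0 - state.getD l 0 = (k : Int) - l) := by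
  simp only [List.any_eq_true, PySem.List.mem_pyRange_one, decide_eq_true_eq]
  constructor
  · rintro ⟨i, ⟨hi0, hin⟩, j, ⟨hij, hjn⟩, habs⟩
    refine ⟨i.toNat, j.toNat, by omega, by omega, ?_⟩
    rw [abs_eq (by omega)] at habs
    have hi' : (i.toNat : Int) = i := by omega
    have hj' : (j.toNat : Int) = j := by omega
    rw [PySem.List.pyGetD_of_nonneg state 0 (by omega : (0:Int) ≤ i),
        PySem.List.pyGetD_of_nonneg state 0 (by omega : (0:Int) ≤ j)] at habs
    simp only [List.getD_eq_getElem?_getD] at habs ⊢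
    rw [hi', hj']
    omega
  · rintro ⟨k, l, hkl, hln, hd⟩
    refine ⟨(k : Int), ⟨by omega, by omega⟩, (l : Int), ⟨by omega, by omega⟩, ?_⟩
    rw [abs_eq (by omega), PySem.List.pyGetD_natCast, PySem.List.pyGetD_natCast]
    simp only [List.getD_eq_getElem?_getD] at hd ⊢
    omega

theorem pv_main (state : List Int) : is_goal_state state = is_goal_state_alt state := by
  unfold is_goal_state is_goal_state_alt
  by_cases hrow : (PySem.Set.ofList state).length ≠ state.length
  · simp [hrow]
  · simp only [hrow, if_false]
    set n := state.length with hn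
    set mapm := (PySem.List.pyRange 0 (n : Int) 1).map
        (fun i => PySem.List.pyGetD state i 0 - i) with hmapm
    set mapp := (PySem.List.pyRange 0 (n : Int) 1).map
        (fun i => PySem.List.pyGetD state i 0 + i) with hmapp
    have hlenm : mapm.length = n := by
      simp [hmapm, PySem.List.length_pyRange_one]
    have hlenp : mapp.length = n := by
      simp [hmapp, PySem.List.length_pyRange_one]
    have hm : (PySem.Set.ofList mapm).length = n ↔
        ∀ k l : Nat, k < l → l < n →
          PySem.List.pyGetD state (k : Int) 0 - (k : Int) ≠
          PySem.List.pyGetD state (l : Int) 0 - (l : Int) := by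
      have h0 := (pv_len_ofList_eq_iff mapm).trans
        (pv_nodup_map_pyRange n (fun i => PySem.List.pyGetD state i 0 - i))
      rwa [hlenm] at h0
    have hp : (PySem.Set.ofList mapp).length = n ↔
        ∀ k l : Nat, k < l → l < n →
          PySem.List.pyGetD state (k : Int) 0 + (k : Int) ≠
          PySem.List.pyGetD state (l : Int) 0 + (l : Int) := by
      have h0 := (pv_len_ofList_eq_iff mapp).trans
        (pv_nodup_map_pyRange n (fun i => PySem.List.pyGetD state i 0 + i))
      rwa [hlenp] at h0
    by_cases hA : ((PySem.List.pyRange 0 (n : Int) 1).any (fun i =>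
        (PySem.List.pyRange (i + 1) (n : Int) 1).any (fun j =>
          |PySem.List.pyGetD state i 0 - PySem.List.pyGetD state j 0| = j - i))) = true
    · -- a diagonal conflict exists: one of B's two uniqueness checks fails
      rw [if_pos hA]
      obtain ⟨k, l, hkl, hln, hd⟩ := (pv_any_pair_iff state).mp hA
      have hk : PySem.List.pyGetD state (k : Int) 0 = state.getD k 0 :=
        PySem.List.pyGetD_natCast state k 0
      have hl : PySem.List.pyGetD state (l : Int) 0 = state.getD l 0 :=
        PySem.List.pyGetD_natCast state l 0
      rcases hd with hd | hd
      · -- anti-diagonal duplicate: state[k]+k = state[l]+l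
        by_cases hmOk : (PySem.Set.ofList mapm).length = n
        · have hpNe : ¬ (PySem.Set.ofList mapp).length = n := by
            intro h
            exact (hp.mp h) k l hkl hln (by rw [hk, hl]; omega)
          simp [hmOk, hpNe]
        · simp [hmOk]
      · -- main-diagonal duplicate: state[k]-k = state[l]-l
        have hmNe : ¬ (PySem.Set.ofList mapm).length = n := by
          intro h
          exact (hm.mp h) k l hkl hln (by rw [hk, hl]; omega)
        simp [hmNe]
    · -- no conflict: both of B's uniqueness checks succeed
      rw [if_neg hA]
      have hnoc := (pv_any_pair_iff state).not.mp hA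
      push Not at hnoc
      have hmOk : (PySem.Set.ofList mapm).length = n := by
        apply hm.mpr
        intro k l hkl hln heq
        rw [PySem.List.pyGetD_natCast, PySem.List.pyGetD_natCast] at heq
        rcases hnoc k l hkl hln with ⟨h1, h2⟩
        omega
      have hpOk : (PySem.Set.ofList mapp).length = n := by
        apply hp.mpr
        intro k l hkl hln heq
        rw [PySem.List.pyGetD_natCast, PySem.List.pyGetD_natCast] at heq
        rcases hnoc k l hkl hln with ⟨h1, h2⟩
        omega
      simp [hmOk, hpOk]

-- ===== VERDICT (by name: the statement is the Claim_ definition above) =====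
theorem is_goal_state_spec : Claim_equal_is_goal_state := by
  intro state _
  unfold Spec_is_goal_state
  exact pv_main state
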